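-- pv_equiv track=rewrite | github.com/mynlp/optimal-strategy | utils.py | calculate_max_step_len
-- ===== SOURCE A (Python) =====
-- def calculate_max_step_len(actions: list[str]) -> int:
--     cur_max: int = 0
--     tmp_step_len: int = 0
--
--     for a in actions:
--         tmp_step_len += 1
--
--         if a == "SHIFT":
--             cur_max = max(cur_max, tmp_step_len)
--             tmp_step_len = 0
--
--     return cur_max
-- ===== SOURCE B (Python) =====
-- def calculate_max_step_len(actions: list[str]) -> int:
--     best = 0
--     start = 0
--     while True:
--         try:
--             p = actions.index("SHIFT", start)
--         except ValueError:
--             return best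
--         best = max(best, p - start + 1)
--         start = p + 1
-- ===== Notes on version B (the rewrite author's own statement) =====
-- stated objective: alternative
-- what changed: replaced the per-element running counter with reset by a search loop that repeatedly finds the index of the next SHIFT and takes the max of the gap lengths
import Mathlib
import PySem

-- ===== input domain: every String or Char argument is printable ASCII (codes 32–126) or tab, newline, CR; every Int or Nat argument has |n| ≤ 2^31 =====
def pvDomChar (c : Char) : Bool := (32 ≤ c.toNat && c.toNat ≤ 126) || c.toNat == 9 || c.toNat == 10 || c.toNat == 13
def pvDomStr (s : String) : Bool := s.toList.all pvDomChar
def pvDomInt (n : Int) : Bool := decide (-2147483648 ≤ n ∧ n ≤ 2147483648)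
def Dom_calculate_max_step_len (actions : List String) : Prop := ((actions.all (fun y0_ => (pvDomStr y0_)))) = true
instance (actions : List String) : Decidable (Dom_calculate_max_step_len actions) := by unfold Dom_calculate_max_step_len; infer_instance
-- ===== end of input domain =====

-- B changes the algorithm shape only (search for next SHIFT + gap arithmetic instead of a
-- running counter with reset); same O(n) cost, return values identical on all inputs.

-- ===== PORT A =====
-- one loop step of A: tmp_step_len += 1; if a == "SHIFT": cur_max = max(cur_max, tmp); tmp = 0
def pvStepA (s : Int × Int) (a : String) : Int × Int :=
  let tmp := s.2 + 1
  if a == "SHIFT" then (max s.1 tmp, 0) else (s.1, tmp)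

def calculate_max_step_len (actions : List String) : Int :=
  (actions.foldl pvStepA (0, 0)).1

-- ===== PORT B =====
-- hand port of actions.index("SHIFT", start): position of the first "SHIFT" in the suffix,
-- none = ValueError; exact since .index compares by equality
def pvFindShift : List String → Option Nat
  | [] => none
  | a :: rest => if a == "SHIFT" then some 0 else (pvFindShift rest).map (· + 1)

theorem pvFindShift_lt : ∀ (l : List String) (p : Nat), pvFindShift l = some p → p < l.length := by
  intro l
  induction l with
  | nil => intro p h; simp [pvFindShift] at h
  | cons a rest ih =>
    intro p h
    simp only [pvFindShift] at h
    split at h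
    · simp at h; simp [List.length_cons]; omega
    · cases hr : pvFindShift rest with
      | none => rw [hr] at h; simp at h
      | some q =>
        rw [hr] at h; simp at h
        have := ih q hr
        simp [List.length_cons]; omega

-- the while loop of B, on the suffix actions[start:] (p is the SHIFT position relative to start)
def pvAltGo (l : List String) (best : Int) : Int :=
  match h : pvFindShift l with
  | none => best
  | some p => pvAltGo (l.drop (p + 1)) (max best ((p : Int) + 1))
termination_by l.length
decreasing_by
  have := pvFindShift_lt l p h
  simp [List.length_drop]; omega

def calculate_max_step_len_alt (actions : List String) : Int :=
  pvAltGo actions 0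

-- ===== PRECONDITION & SPEC =====
def Spec_calculate_max_step_len (actions : List String) (out : Int) : Prop := out = calculate_max_step_len_alt actions
instance (actions : List String) (out : Int) : Decidable (Spec_calculate_max_step_len actions out) := by unfold Spec_calculate_max_step_len; infer_instance

-- ===== CLAIM (what is proved, stated in full; the proofs are below) =====
def Claim_equal_calculate_max_step_len : Prop := ∀ (actions : List String), Dom_calculate_max_step_len actions → Spec_calculate_max_step_len actions (calculate_max_step_len actions)

-- ===== LEMMAS AND PROOFS =====

theorem pvFindShift_none (l : List String) (h : pvFindShift l = none) :
    ∀ a ∈ l, a ≠ "SHIFT" := by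
  induction l with
  | nil => simp
  | cons a rest ih =>
    by_cases ha : a = "SHIFT"
    · simp [pvFindShift, ha] at h
    · simp only [pvFindShift, beq_iff_eq, if_neg ha] at h
      intro x hx
      rcases List.mem_cons.mp hx with hx | hx
      · subst hx; exact ha
      · exact ih (by cases hr : pvFindShift rest <;> simp [hr] at h ⊢) x hx

theorem pvFindShift_some : ∀ (l : List String) (p : Nat), pvFindShift l = some p →
    ∃ hp : p < l.length, l[p] = "SHIFT" ∧ ∀ a ∈ l.take p, a ≠ "SHIFT" := by
  intro l
  induction l with
  | nil => intro p h; simp [pvFindShift] at h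
  | cons a rest ih =>
    intro p h
    by_cases ha : a = "SHIFT"
    · simp only [pvFindShift, beq_iff_eq, if_pos ha] at h
      simp at h
      subst h
      exact ⟨by simp, by simpa using ha, by simp⟩
    · simp only [pvFindShift, beq_iff_eq, if_neg ha] at h
      cases hr : pvFindShift rest with
      | none => rw [hr] at h; simp at h
      | some q =>
        rw [hr] at h; simp at h
        obtain ⟨hq, hget, htake⟩ := ih q hr
        subst h
        refine ⟨by simpa using Nat.succ_lt_succ hq, by simpa using hget, ?_⟩
        intro x hx
        rcases List.mem_cons.mp (by simpa using hx) with hx' | hx'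
        · subst hx'; exact ha
        · exact htake x hx'

-- over a SHIFT-free segment A's fold only advances the counter
theorem pvFoldA_noshift (l : List String) (h : ∀ a ∈ l, a ≠ "SHIFT") :
    ∀ m t : Int, l.foldl pvStepA (m, t) = (m, t + l.length) := by
  induction l with
  | nil => intro m t; simp
  | cons a rest ih =>
    intro m t
    have ha : a ≠ "SHIFT" := h a (List.mem_cons_self)
    have : pvStepA (m, t) a = (m, t + 1) := by
      simp [pvStepA, ha]
    rw [List.foldl_cons, this, ih (fun x hx => h x (List.mem_cons_of_mem _ hx))]
    simp; ring

theorem pvMain (n : Nat) : ∀ (l : List String), l.length ≤ n →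
    ∀ m : Int, 0 ≤ m → (l.foldl pvStepA (m, 0)).1 = pvAltGo l m := by
  induction n with
  | zero =>
    intro l hl m hm
    have : l = [] := List.eq_nil_of_length_eq_zero (Nat.le_zero.mp hl)
    subst this
    simp [pvAltGo, pvFindShift]
  | succ n ih =>
    intro l hl m hm
    cases hfs : pvFindShift l with
    | none =>
      rw [pvAltGo, hfs]
      rw [pvFoldA_noshift l (pvFindShift_none l hfs)]
    | some p =>
      rw [pvAltGo, hfs]
      obtain ⟨hp, hget, htake⟩ := pvFindShift_some l p hfs
      have hsplit : l = l.take p ++ l[p] :: l.drop (p + 1) := by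
        conv_lhs => rw [← List.take_append_drop p l]
        rw [List.drop_eq_getElem_cons hp]
      have hlen : (l.take p).length = p := by
        simp [List.length_take]; omega
      conv_lhs => rw [hsplit]
      rw [List.foldl_append, pvFoldA_noshift _ htake, List.foldl_cons]
      have hstep : pvStepA (m, 0 + ((l.take p).length : Int)) l[p] = (max m ((p : Int) + 1), 0) := by
        simp [pvStepA, hget, hlen]
      rw [hstep]
      have hdlen : (l.drop (p + 1)).length ≤ n := by
        simp [List.length_drop]; omega
      exact ih (l.drop (p + 1)) hdlen (max m ((p : Int) + 1)) (le_trans hm (le_max_left _ _))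

-- ===== VERDICT (by name: the statement is the Claim_ definition above) =====
theorem calculate_max_step_len_spec : Claim_equal_calculate_max_step_len := by
  intro actions _
  unfold Spec_calculate_max_step_len calculate_max_step_len calculate_max_step_len_alt
  exact pvMain actions.length actions le_rfl 0 le_rfl
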